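-- pv_equiv track=rewrite | github.com/big-ssk/CodeSignal | intro/46_electionsWinners.py | electionsWinners
-- ===== SOURCE A (Python) =====
-- def electionsWinners(votes, k):
--     res = 0
--     curr_max = max(votes)
--     rv = votes.count(curr_max)
--
--     if not k and rv == 1:
--         return 1
--
--     for i in votes:
--         if i + k > curr_max:
--             res += 1
--
--     return res
-- ===== SOURCE B (Python) =====
-- def electionsWinners(votes, k):
--     s = sorted(votes)
--     leader = s[-1]
--     if not k:
--         return 1 if len(s) == 1 or s[-2] != leader else 0
--     res = 0
--     for v in reversed(s):
--         if v + k <= leader: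
--             break
--         res += 1
--     return res
-- ===== Notes on version B (the rewrite author's own statement) =====
-- stated objective: alternative
-- what changed: B sorts the votes once and reads the leader as the last element, answers the k==0 case by comparing the top two sorted entries, and counts contenders by scanning the sorted list from the top with an early break, replacing A's three linear passes (max, count, full compare loop).
import Mathlib
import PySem

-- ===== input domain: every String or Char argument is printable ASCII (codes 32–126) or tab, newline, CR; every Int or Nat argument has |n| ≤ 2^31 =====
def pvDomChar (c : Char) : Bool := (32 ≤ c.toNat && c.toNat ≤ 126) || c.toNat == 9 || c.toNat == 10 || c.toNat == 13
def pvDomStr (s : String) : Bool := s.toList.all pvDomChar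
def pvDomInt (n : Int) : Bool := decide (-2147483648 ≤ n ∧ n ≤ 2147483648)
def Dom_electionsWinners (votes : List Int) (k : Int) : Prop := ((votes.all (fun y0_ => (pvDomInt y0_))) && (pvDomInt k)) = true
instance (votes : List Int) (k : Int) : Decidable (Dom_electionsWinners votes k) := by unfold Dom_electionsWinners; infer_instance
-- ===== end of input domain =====

-- ===== PORT A =====
-- B changes the algorithm (sort once, read the leader and runner-up from the sorted tail,
-- count contenders by a top-down scan with early break); same return value on Pre_.
def electionsWinners (votes : List Int) (k : Int) : Int :=
  match PySem.List.max? votes (fun x => x) with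
  | none => 0  -- max([]) raises ValueError; excluded by Pre_
  | some currMax =>
    let rv : Int := PySem.List.count votes currMax
    if k = 0 ∧ rv = 1 then 1
    else votes.foldl (fun res i => if i + k > currMax then res + 1 else res) 0

-- ===== PORT B =====
-- the for-loop over reversed(s) with a break as soon as v + k <= leader
def bTopScan (k leader : Int) : List Int → Int
  | [] => 0
  | v :: rest => if v + k ≤ leader then 0 else bTopScan k leader rest + 1

def electionsWinners_alt (votes : List Int) (k : Int) : Int :=
  let s := PySem.List.sorted votes (fun x => x) false
  match PySem.List.pyGet? s (-1) with
  | none => 0  -- s[-1] raises IndexError on []; excluded by Pre_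
  | some leader =>
    if k = 0 then
      if s.length = 1 then 1
      else if PySem.List.pyGet? s (-2) ≠ some leader then 1 else 0
    else bTopScan k leader s.reverse

-- ===== PRECONDITION & SPEC =====
-- A raises ValueError on an empty list (max([])); B raises IndexError there too.
def Pre_electionsWinners (votes : List Int) (k : Int) : Prop := votes ≠ []
instance (votes : List Int) (k : Int) : Decidable (Pre_electionsWinners votes k) := by unfold Pre_electionsWinners; infer_instance
def pvWitness_electionsWinners : List Int × Int := ([2, 3, 5, 2], 3)

def Spec_electionsWinners (votes : List Int) (k : Int) (out : Int) : Prop := out = electionsWinners_alt votes k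
instance (votes : List Int) (k : Int) (out : Int) : Decidable (Spec_electionsWinners votes k out) := by unfold Spec_electionsWinners; infer_instance

-- ===== CLAIM (what is proved, stated in full; the proofs are below) =====
def Claim_equal_electionsWinners : Prop := ∀ (votes : List Int) (k : Int), Dom_electionsWinners votes k → Pre_electionsWinners votes k → Spec_electionsWinners votes k (electionsWinners votes k)

-- ===== LEMMAS AND PROOFS =====

-- the top-down scan with break counts exactly the elements above the threshold,
-- provided the list is non-increasing
theorem bTopScan_eq_countP (k leader : Int) (l : List Int)
    (h : l.Pairwise (fun a b => b ≤ a)) :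
    bTopScan k leader l = (l.countP (fun i => decide (i + k > leader)) : Int) := by
  induction l with
  | nil => simp [bTopScan]
  | cons v rest ih =>
    rcases List.pairwise_cons.mp h with ⟨hhead, htail⟩
    by_cases hv : v + k ≤ leader
    · have hz : rest.countP (fun i => decide (i + k > leader)) = 0 := by
        rw [List.countP_eq_zero]
        intro x hx
        have := hhead x hx
        simp only [decide_eq_true_eq]
        omega
      simp [bTopScan, hv, hz]
    · have : (v + k > leader) := by omega
      simp [bTopScan, hv, ih htail, this]

-- the reverse of the ascending sort starts with the maximum value
theorem sorted_reverse_max (votes : List Int) (m : Int)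
    (hm : PySem.List.max? votes (fun x => x) = some m) :
    ∃ t, (PySem.List.sorted votes (fun x => x) false).reverse = m :: t := by
  have hmem : m ∈ votes := PySem.List.max?_mem hm
  have hmax : ∀ y ∈ votes, y ≤ m := fun y hy => PySem.List.max?_isMax hm y hy
  have hperm := PySem.List.sorted_perm votes (fun x => x) false
  have hpw : ((PySem.List.sorted votes (fun x => x) false).reverse).Pairwise (fun a b => b ≤ a) := by
    rw [List.pairwise_reverse]
    exact PySem.List.sorted_pairwise votes (fun x => x)
  set r := (PySem.List.sorted votes (fun x => x) false).reverse with hr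
  have hmr : m ∈ r := by
    rw [hr, List.mem_reverse, PySem.List.mem_sorted]
    exact hmem
  cases hcr : r with
  | nil => rw [hcr] at hmr; simp at hmr
  | cons a t =>
    refine ⟨t, ?_⟩
    have ha : a ∈ votes := by
      have : a ∈ r := by rw [hcr]; exact List.mem_cons_self
      rw [hr, List.mem_reverse, PySem.List.mem_sorted] at this
      exact this
    have h1 : a ≤ m := hmax a ha
    rw [hcr] at hmr hpw
    rcases List.pairwise_cons.mp hpw with ⟨hhead, _⟩
    have h2 : m ≤ a := by
      rcases List.mem_cons.mp hmr with h | h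
      · omega
      · exact hhead m h
    have : a = m := le_antisymm h1 h2
    rw [this]

-- ===== VERDICT (by name: the statement is the Claim_ definition above) =====
theorem electionsWinners_spec : Claim_equal_electionsWinners := by
  intro votes k _ hpre
  unfold Spec_electionsWinners electionsWinners electionsWinners_alt
  have hne : votes ≠ [] := hpre
  obtain ⟨m, hm⟩ : ∃ m, PySem.List.max? votes (fun x => x) = some m := by
    cases h : PySem.List.max? votes (fun x => x) with
    | none => exact absurd ((PySem.List.max?_eq_none_iff votes (fun x => x)).mp h) hne
    | some m => exact ⟨m, rfl⟩
  obtain ⟨t, hrev⟩ := sorted_reverse_max votes m hm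
  have hperm : (PySem.List.sorted votes (fun x => x) false).Perm votes :=
    PySem.List.sorted_perm votes (fun x => x) false
  have hlast : PySem.List.pyGet? (PySem.List.sorted votes (fun x => x) false) (-1) = some m := by
    rw [PySem.List.pyGet?_neg_one, ← List.head?_reverse, hrev]
    rfl
  have hpw : (PySem.List.sorted votes (fun x => x) false).reverse.Pairwise (fun a b => b ≤ a) := by
    rw [List.pairwise_reverse]
    exact PySem.List.sorted_pairwise votes (fun x => x)
  simp only [hm, hlast]
  have hcount : PySem.List.count votes m = (PySem.List.sorted votes (fun x => x) false).reverse.count m := by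
    rw [List.count_reverse]
    exact (hperm.count_eq m).symm
  have hfold : votes.foldl (fun res i => if i + k > m then res + 1 else res) 0
      = (votes.countP (fun i => decide (i + k > m)) : Int) := by
    rw [PySem.List.foldl_ite_add_one]
    simp
  have hscan : bTopScan k m (PySem.List.sorted votes (fun x => x) false).reverse
      = (votes.countP (fun i => decide (i + k > m)) : Int) := by
    rw [bTopScan_eq_countP k m _ hpw, List.countP_reverse, hperm.countP_eq]
  by_cases hk : k = 0
  · subst hk
    have hlen : (PySem.List.sorted votes (fun x => x) false).length = t.length + 1 := by
      have := congrArg List.length hrev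
      simpa using this
    by_cases h1 : (PySem.List.sorted votes (fun x => x) false).length = 1
    · -- single element: count = 1, both return 1
      have ht : t = [] := by rw [hlen] at h1; simpa using h1
      have hrv : List.count m votes = 1 := by
        have : PySem.List.count votes m = 1 := by rw [hcount, hrev, ht]; simp
        simpa using this
      simp [h1]
      intro hc
      exact absurd hrv hc
    · -- at least two elements
      have ht : t ≠ [] := by
        intro h
        exact h1 (by rw [hlen, h]; rfl)
      obtain ⟨t0, t', rfl⟩ := List.exists_cons_of_ne_nil ht
      have hs2 : PySem.List.pyGet? (PySem.List.sorted votes (fun x => x) false) (-2) = some t0 := by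
        have hlen2 : 2 ≤ (PySem.List.sorted votes (fun x => x) false).length := by
          rw [hlen]; simp
        rw [PySem.List.pyGet?_neg_ofNat _ 2 (by omega) hlen2]
        have heq : (PySem.List.sorted votes (fun x => x) false).reverse[1]?
            = (PySem.List.sorted votes (fun x => x) false)[(PySem.List.sorted votes (fun x => x) false).length - 2]? := by
          rw [List.getElem?_reverse (by omega), Nat.sub_sub]
        rw [← heq, hrev]
        rfl
      rcases List.pairwise_cons.mp (hrev ▸ hpw) with ⟨hhead, hpwt⟩
      have ht0m : t0 ≤ m := hhead t0 List.mem_cons_self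
      by_cases he : t0 = m
      · -- runner-up equals leader: rv ≥ 2, A's loop counts nothing at k = 0
        have hrv2 : 2 ≤ List.count m votes := by
          have : 2 ≤ PySem.List.count votes m := by
            rw [hcount, hrev, he]
            simp
          simpa using this
        have hlenv : (PySem.List.sorted votes (fun x => x) false).length = votes.length := by
          simpa using congrArg List.length (hperm.length_eq)
        have hz : votes.countP (fun i => decide (m < i)) = 0 := by
          rw [List.countP_eq_zero]
          intro x hx
          have := PySem.List.max?_isMax hm x hx
          simp only [decide_eq_true_eq]
          omega
        simp [hs2, he]
        rw [if_neg (by omega), if_neg (by rw [← hlenv]; omega)]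
        rw [PySem.List.foldl_ite_add_one]
        simp [hz]
      · -- unique leader: rv = 1, both return 1
        have hct : (t0 :: t').count m = 0 := by
          rw [List.count_eq_zero]
          intro hmem
          rcases List.mem_cons.mp hmem with h | h
          · exact he h.symm
          · rcases List.pairwise_cons.mp hpwt with ⟨hh2, _⟩
            have := hh2 m h
            omega
        have hrv : List.count m votes = 1 := by
          have : PySem.List.count votes m = 1 := by
            rw [hcount, hrev, List.count_cons, hct]
            simp
          simpa using this
        simp [hs2, he]
        intro hc
        exact absurd hrv hc
  · rw [if_neg (fun h => hk h.1), if_neg hk, hfold, hscan]
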